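-- pv_equiv track=rewrite | github.com/ProjectAurelion/ProjectAurelion | finance/insider-transaction-strategy/tool/form4_normalization.py | choose_latest_filing
-- ===== SOURCE A (Python) =====
-- def supersession_key(row: dict[str, str]) -> tuple[str, str, str]:
--     return (
--         row.get("issuer_cik", ""),
--         row.get("owner_group_id", ""),
--         row.get("period_of_report", ""),
--         row.get("transaction_table", ""),
--         row.get("transaction_date", ""),
--         row.get("transaction_code", ""),
--         row.get("security_type", ""),
--         row.get("shares", ""),
--         row.get("price", ""),
--         row.get("ownership_type", ""),
--     )
--
-- def choose_latest_filing(rows: list[dict[str, str]]) -> dict[tuple[str, str, str], str]: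
--     latest: dict[tuple[str, str, str], tuple[str, str, str]] = {}
--     for row in rows:
--         key = supersession_key(row)
--         candidate = (
--             row.get("acceptance_datetime", ""),
--             row.get("filing_date", ""),
--             row.get("accession", ""),
--         )
--         current = latest.get(key)
--         if current is None or candidate > current:
--             latest[key] = candidate
--     return {key: value[2] for key, value in latest.items()}
-- ===== SOURCE B (Python) =====
-- def supersession_key(row: dict[str, str]) -> tuple[str, str, str]:
--     return (
--         row.get("issuer_cik", ""),
--         row.get("owner_group_id", ""),
--         row.get("period_of_report", ""),
--         row.get("transaction_table", ""),
--         row.get("transaction_date", ""),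
--         row.get("transaction_code", ""),
--         row.get("security_type", ""),
--         row.get("shares", ""),
--         row.get("price", ""),
--         row.get("ownership_type", ""),
--     )
--
-- def choose_latest_filing(rows: list[dict[str, str]]) -> dict[tuple[str, str, str], str]:
--     # group all candidate tuples by supersession key, then take one max per group
--     groups: dict[tuple, list[tuple[str, str, str]]] = {}
--     for row in rows:
--         groups.setdefault(supersession_key(row), []).append((
--             row.get("acceptance_datetime", ""),
--             row.get("filing_date", ""),
--             row.get("accession", ""),
--         ))
--     return {key: max(cands)[2] for key, cands in groups.items()}
-- ===== Notes on version B (the rewrite author's own statement) =====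
-- stated objective: alternative
-- what changed: A keeps one running best candidate per key with an in-loop compare-and-update; B instead groups all candidate tuples per supersession key into lists (setdefault/append) and then takes max() once per group in a dict comprehension.
import Mathlib
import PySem

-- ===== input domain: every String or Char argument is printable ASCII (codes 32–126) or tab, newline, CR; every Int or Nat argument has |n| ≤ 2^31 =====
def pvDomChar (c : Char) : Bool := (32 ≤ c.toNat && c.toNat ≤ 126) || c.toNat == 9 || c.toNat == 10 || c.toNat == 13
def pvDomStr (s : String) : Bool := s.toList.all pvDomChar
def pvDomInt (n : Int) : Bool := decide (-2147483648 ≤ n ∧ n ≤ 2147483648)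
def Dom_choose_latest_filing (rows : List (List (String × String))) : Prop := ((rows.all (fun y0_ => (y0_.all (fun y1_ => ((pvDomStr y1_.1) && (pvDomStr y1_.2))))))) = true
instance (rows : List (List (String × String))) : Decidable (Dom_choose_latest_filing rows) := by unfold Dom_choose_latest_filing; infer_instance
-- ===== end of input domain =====

-- B replaces A's running compare-and-update with a group-then-reduce pass (collect every
-- candidate per supersession key, then one max per group); alternative decomposition, same cost.

-- ===== PORT A =====
-- row.get(k, ""): first-match lookup in the association list (the Python dict row)
def rget (row : List (String × String)) (k : String) : String :=
  match row.find? (fun p => p.1 == k) with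
  | some p => p.2
  | none => ""

-- shared module helper supersession_key (a 10-tuple, rendered as List String)
def supersessionKey (row : List (String × String)) : List String :=
  [rget row "issuer_cik", rget row "owner_group_id", rget row "period_of_report",
   rget row "transaction_table", rget row "transaction_date", rget row "transaction_code",
   rget row "security_type", rget row "shares", rget row "price", rget row "ownership_type"]

def candOf (row : List (String × String)) : String × String × String :=
  (rget row "acceptance_datetime", rget row "filing_date", rget row "accession")

-- Python's '>' on a 3-tuple of strings: lexicographic by components (codepoint order on
-- strings = Lean's String '<'; exact on all inputs)
def candGt (a b : String × String × String) : Bool :=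
  if a.1 ≠ b.1 then decide (b.1 < a.1)
  else if a.2.1 ≠ b.2.1 then decide (b.2.1 < a.2.1)
  else decide (b.2.2 < a.2.2)

def choose_latest_filing (rows : List (List (String × String))) : List (List String × String) :=
  let latest := rows.foldl
    (fun (d : PySem.Dict (List String) (String × String × String)) row =>
      match d.get? (supersessionKey row) with
      | none => d.insert (supersessionKey row) (candOf row)
      | some current =>
          if candGt (candOf row) current then d.insert (supersessionKey row) (candOf row) else d)
    PySem.Dict.empty
  latest.items.map (fun kv => (kv.1, kv.2.2.2))

-- ===== PORT B =====
-- Python's max() over a nonempty list of 3-tuples of strings: keeps the first maximal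
-- element, comparing with tuple '>' (candGt); ported by hand since Lean's Prod order is
-- not Python's tuple order ([] is unreachable: B only builds nonempty groups).
def pyMaxCand (xs : List (String × String × String)) : String × String × String :=
  match xs with
  | [] => ("", "", "")
  | x :: rest => rest.foldl (fun cur y => if candGt y cur then y else cur) x

def choose_latest_filing_alt (rows : List (List (String × String))) : List (List String × String) :=
  let groups := rows.foldl
    (fun (d : PySem.Dict (List String) (List (String × String × String))) row =>
      d.modify (supersessionKey row) [] (· ++ [candOf row]))
    PySem.Dict.empty
  groups.items.map (fun kv => (kv.1, (pyMaxCand kv.2).2.2))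

-- ===== PRECONDITION & SPEC =====
def Spec_choose_latest_filing (rows : List (List (String × String))) (out : List (List String × String)) : Prop := out = choose_latest_filing_alt rows
instance (rows : List (List (String × String))) (out : List (List String × String)) : Decidable (Spec_choose_latest_filing rows out) := by unfold Spec_choose_latest_filing; infer_instance

-- ===== CLAIM (what is proved, stated in full; the proofs are below) =====
def Claim_equal_choose_latest_filing : Prop := ∀ (rows : List (List (String × String))), Dom_choose_latest_filing rows → Spec_choose_latest_filing rows (choose_latest_filing rows)

-- ===== LEMMAS AND PROOFS =====

-- the abstraction relating the two loop states: take the max of every group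
def mv (d : PySem.Dict (List String) (List (String × String × String))) :
    PySem.Dict (List String) (String × String × String) :=
  PySem.Dict.mk (d.items.map (fun p => (p.1, pyMaxCand p.2)))

theorem get?_mv (d : PySem.Dict (List String) (List (String × String × String))) (k : List String) :
    (mv d).get? k = (d.get? k).map pyMaxCand := by
  simp [mv, PySem.Dict.get?, List.find?_map, Function.comp_def, Option.map_map]

theorem contains_mv (d : PySem.Dict (List String) (List (String × String × String))) (k : List String) :
    (mv d).contains k = d.contains k := by
  simp [mv, PySem.Dict.contains, List.any_map, Function.comp_def]

theorem keys_mv (d : PySem.Dict (List String) (List (String × String × String))) :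
    (mv d).keys = d.keys := by
  simp [mv, PySem.Dict.keys, List.map_map, Function.comp_def]

theorem mv_insert (d : PySem.Dict (List String) (List (String × String × String)))
    (k : List String) (l : List (String × String × String)) :
    mv (d.insert k l) = (mv d).insert k (pyMaxCand l) := by
  simp only [PySem.Dict.insert, contains_mv]
  split
  · simp only [mv, List.map_map]
    congr 1
    apply List.map_congr_left
    intro p _
    by_cases h2 : p.1 = k <;> simp [h2]
  · simp [mv]

theorem pyMaxCand_append (l : List (String × String × String)) (hl : l ≠ [])
    (c : String × String × String) :
    pyMaxCand (l ++ [c]) = if candGt c (pyMaxCand l) then c else pyMaxCand l := by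
  cases l with
  | nil => exact absurd rfl hl
  | cons x rest => simp [pyMaxCand, List.foldl_append]

-- re-inserting the value already stored at a key changes nothing (keys are unique)
theorem insert_get?_self (d : PySem.Dict (List String) (String × String × String))
    (hnd : d.keys.Nodup) (k : List String) (v : String × String × String)
    (h : d.get? k = some v) : d.insert k v = d := by
  obtain ⟨items⟩ := d
  simp only [PySem.Dict.get?, Option.map_eq_some_iff] at h
  obtain ⟨p, hp, hv⟩ := h
  have hpk : p.1 = k := by simpa using List.find?_some hp
  have hpmem : p ∈ items := List.mem_of_find?_eq_some hp
  have hpeq : p = (k, v) := by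
    rcases p with ⟨p1, p2⟩; simp_all
  have hcont : (PySem.Dict.mk items).contains k = true := by
    simp only [PySem.Dict.contains, List.any_eq_true]
    exact ⟨p, hpmem, by simp [hpk]⟩
  simp only [PySem.Dict.insert, hcont, if_pos]
  congr 1
  conv_rhs => rw [← List.map_id items]
  apply List.map_congr_left
  intro q hq
  by_cases hqk : (q.1 == k) = true
  · have hq1 : q.1 = p.1 := by simpa [hpk] using hqk
    have : q = p := List.inj_on_of_nodup_map hnd hq hpmem hq1
    simp [this, hpeq]
  · simp [hqk]

-- one step of A's loop on the abstracted state = abstraction of one step of B's loop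
theorem step_eq (d : PySem.Dict (List String) (List (String × String × String)))
    (hnd : d.keys.Nodup) (hne : ∀ p ∈ d.items, p.2 ≠ []) (row : List (String × String)) :
    (match (mv d).get? (supersessionKey row) with
     | none => (mv d).insert (supersessionKey row) (candOf row)
     | some current =>
         if candGt (candOf row) current then (mv d).insert (supersessionKey row) (candOf row)
         else mv d)
    = mv (d.modify (supersessionKey row) [] (· ++ [candOf row])) := by
  rw [PySem.Dict.modify, get?_mv]
  cases hd : d.get? (supersessionKey row) with
  | none =>
      rw [PySem.Dict.getD_of_get?_eq_none _ _ hd, mv_insert]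
      simp [pyMaxCand]
  | some l =>
      have hlne : l ≠ [] := hne _ (PySem.Dict.mem_items_of_get?_eq_some _ hd)
      rw [PySem.Dict.getD_of_get?_eq_some _ _ hd, mv_insert,
        pyMaxCand_append l hlne (candOf row)]
      simp only [Option.map_some]
      by_cases hgt : candGt (candOf row) (pyMaxCand l)
      · simp [hgt]
      · simp only [hgt, if_false, Bool.false_eq_true]
        refine (insert_get?_self (mv d) ?_ _ _ ?_).symm
        · rw [keys_mv]; exact hnd
        · rw [get?_mv, hd]; rfl

theorem loop_eq (rows : List (List (String × String)))
    (d : PySem.Dict (List String) (List (String × String × String)))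
    (hnd : d.keys.Nodup) (hne : ∀ p ∈ d.items, p.2 ≠ []) :
    rows.foldl
      (fun (d : PySem.Dict (List String) (String × String × String)) row =>
        match d.get? (supersessionKey row) with
        | none => d.insert (supersessionKey row) (candOf row)
        | some current =>
            if candGt (candOf row) current then d.insert (supersessionKey row) (candOf row) else d)
      (mv d)
    = mv (rows.foldl
        (fun (d : PySem.Dict (List String) (List (String × String × String))) row =>
          d.modify (supersessionKey row) [] (· ++ [candOf row])) d) := by
  induction rows generalizing d with
  | nil => rfl
  | cons r rs ih =>
      simp only [List.foldl_cons]
      rw [step_eq d hnd hne r]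
      refine ih _ ?_ ?_
      · rw [PySem.Dict.modify]
        exact PySem.Dict.nodup_keys_insert _ _ _ hnd
      · rw [PySem.Dict.modify]
        intro p hp
        rcases (PySem.Dict.mem_items_insert _ _ _ _).1 hp with hpe | ⟨hpd, _⟩
        · subst hpe; simp
        · exact hne _ hpd

-- ===== VERDICT (by name: the statement is the Claim_ definition above) =====
theorem choose_latest_filing_spec : Claim_equal_choose_latest_filing := by
  intro rows _
  show _ = _
  unfold choose_latest_filing choose_latest_filing_alt
  have hempty : (PySem.Dict.empty : PySem.Dict (List String) (String × String × String))
      = mv PySem.Dict.empty := rfl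
  rw [hempty, loop_eq rows PySem.Dict.empty PySem.Dict.nodup_keys_empty (by simp [PySem.Dict.empty])]
  simp [mv, List.map_map, Function.comp_def]
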